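-- pv_equiv track=rewrite | github.com/Dilan1234321/dilly-workspace | projects/dilly/api/routers/calendar_feed.py | _ics_escape
-- ===== SOURCE A (Python) =====
-- def _ics_escape(text: str) -> str:
--     """Escape RFC 5545 TEXT values. Commas, semicolons, backslashes, and
--     newlines must be escaped."""
--     if not text:
--         return ""
--     out = str(text)
--     out = out.replace("\\", "\\\\")
--     out = out.replace(",", "\\,")
--     out = out.replace(";", "\\;")
--     out = out.replace("\n", "\\n")
--     out = out.replace("\r", "")
--     out = "".join(ch for ch in out if ord(ch) >= 32 or ch == " ")
--     return out[:600]
-- ===== SOURCE B (Python) =====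
-- def _ics_escape(text: str) -> str:
--     """Single pass: classify each character once instead of five replace passes."""
--     if not text:
--         return ""
--     parts = []
--     for ch in text:
--         if ch == "\\":
--             parts.append("\\\\")
--         elif ch == ",":
--             parts.append("\\,")
--         elif ch == ";":
--             parts.append("\\;")
--         elif ch == "\n":
--             parts.append("\\n")
--         elif ch == "\r":
--             pass
--         elif ord(ch) < 32:
--             pass
--         else:
--             parts.append(ch)
--     return "".join(parts)[:600]
-- ===== Notes on version B (the rewrite author's own statement) =====
-- stated objective: simpler
-- what changed: Replaced five sequential replace passes plus a filtering join with a single traversal that classifies each character once and appends its escaped form (or nothing) to a parts list.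
import Mathlib
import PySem

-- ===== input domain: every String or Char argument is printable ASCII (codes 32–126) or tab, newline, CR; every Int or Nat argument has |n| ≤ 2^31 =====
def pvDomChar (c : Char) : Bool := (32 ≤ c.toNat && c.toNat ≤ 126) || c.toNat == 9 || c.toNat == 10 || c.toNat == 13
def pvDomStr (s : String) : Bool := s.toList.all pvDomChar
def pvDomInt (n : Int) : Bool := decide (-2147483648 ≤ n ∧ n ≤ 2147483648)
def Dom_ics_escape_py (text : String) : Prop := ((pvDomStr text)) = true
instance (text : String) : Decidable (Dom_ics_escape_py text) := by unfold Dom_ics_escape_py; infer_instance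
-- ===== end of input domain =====

-- B replaces A's five replace passes + filtering join with one per-character classification pass (simpler).

-- ===== PORT A =====
def ics_escape_py (text : String) : String :=
  if text = "" then "" else
    let cs := text.toList
    let cs := PySem.Chars.replace cs ['\\'] ['\\', '\\']
    let cs := PySem.Chars.replace cs [','] ['\\', ',']
    let cs := PySem.Chars.replace cs [';'] ['\\', ';']
    let cs := PySem.Chars.replace cs ['\n'] ['\\', 'n']
    let cs := PySem.Chars.replace cs ['\r'] []
    let cs := cs.filter (fun ch => 32 ≤ ch.toNat || ch == ' ')
    String.ofList (PySem.List.slice cs none (some 600))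

-- ===== PORT B =====
def pvEsc (ch : Char) : List Char :=
  if ch = '\\' then ['\\', '\\']
  else if ch = ',' then ['\\', ',']
  else if ch = ';' then ['\\', ';']
  else if ch = '\n' then ['\\', 'n']
  else if ch = '\r' then []
  else if ch.toNat < 32 then []
  else [ch]

def ics_escape_py_alt (text : String) : String :=
  if text = "" then "" else
    let parts := text.toList.foldl (fun acc ch => acc ++ pvEsc ch) []
    String.ofList (parts.take 600)

-- ===== PRECONDITION & SPEC =====
def Spec_ics_escape_py (text : String) (out : String) : Prop := out = ics_escape_py_alt text
instance (text : String) (out : String) : Decidable (Spec_ics_escape_py text out) := by unfold Spec_ics_escape_py; infer_instance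

-- ===== CLAIM (what is proved, stated in full; the proofs are below) =====
def Claim_equal_ics_escape_py : Prop := ∀ (text : String), Dom_ics_escape_py text → Spec_ics_escape_py text (ics_escape_py text)

-- ===== LEMMAS AND PROOFS =====

-- one step of PySem.Chars.replace.go for a single-character pattern
theorem pvGoStep (a c : Char) (new t acc : List Char) (fuel : Nat) :
    PySem.Chars.replace.go [a] new (fuel + 1) (c :: t) acc =
      if a = c then PySem.Chars.replace.go [a] new fuel t (new.reverse ++ acc)
      else PySem.Chars.replace.go [a] new fuel t (c :: acc) := by
  rw [PySem.Chars.replace.go]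
  simp [List.isPrefixOf]

theorem pvGoSingleton (a : Char) (new : List Char) (l acc : List Char) :
    PySem.Chars.replace.go [a] new l.length l acc =
      acc.reverse ++ l.flatMap (fun c => if c = a then new else [c]) := by
  induction l generalizing acc with
  | nil => simp [PySem.Chars.replace.go]
  | cons c t ih =>
    rw [List.length_cons, pvGoStep]
    by_cases h : a = c
    · subst h
      rw [ih]
      simp
    · rw [if_neg h, ih]
      simp [Ne.symm h]

theorem pvReplaceSingleton (a : Char) (new : List Char) (l : List Char) :
    PySem.Chars.replace l [a] new = l.flatMap (fun c => if c = a then new else [c]) := by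
  rw [PySem.Chars.replace]
  simp [pvGoSingleton]

-- the five replace passes followed by the control-character filter act per character exactly as pvEsc
theorem pvPerChar (c : Char) (h : pvDomChar c = true) :
    List.flatMap (fun a =>
      List.flatMap (fun a =>
        List.flatMap (fun a =>
          List.flatMap (fun a =>
            List.filter (fun ch => decide (32 ≤ ch.toNat) || ch == ' ')
              (if a = '\r' then [] else [a]))
            (if a = '\n' then ['\\', 'n'] else [a]))
          (if a = ';' then ['\\', ';'] else [a]))
        (if a = ',' then ['\\', ','] else [a]))
      (if c = '\\' then ['\\', '\\'] else [c]) = pvEsc c := by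
  by_cases h1 : c = '\\'
  · subst h1; decide
  by_cases h2 : c = ','
  · subst h2; decide
  by_cases h3 : c = ';'
  · subst h3; decide
  by_cases h4 : c = '\n'
  · subst h4; decide
  by_cases h5 : c = '\r'
  · subst h5; decide
  -- generic character: every replace pass keeps it, only the filter may drop it
  simp only [if_neg h1, if_neg h2, if_neg h3, if_neg h4, if_neg h5, List.flatMap_cons,
    List.flatMap_nil, List.append_nil]
  by_cases h6 : c.toNat < 32
  · have hsp : (c == ' ') = false := by
      simp only [beq_eq_false_iff_ne, ne_eq]
      intro hc; subst hc; exact absurd h6 (by decide)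
    simp [pvEsc, h1, h2, h3, h4, h5, h6, List.filter, hsp, Nat.not_le.mpr h6]
  · simp [pvEsc, h1, h2, h3, h4, h5, h6, List.filter, Nat.le_of_not_lt h6]

theorem pvChainEq (l : List Char) (hdom : l.all pvDomChar = true) :
    (PySem.Chars.replace
        (PySem.Chars.replace
          (PySem.Chars.replace
            (PySem.Chars.replace
              (PySem.Chars.replace l ['\\'] ['\\', '\\'])
              [','] ['\\', ','])
            [';'] ['\\', ';'])
          ['\n'] ['\\', 'n'])
        ['\r'] []).filter (fun ch => 32 ≤ ch.toNat || ch == ' ')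
      = l.flatMap pvEsc := by
  simp only [pvReplaceSingleton, List.flatMap_assoc, List.filter_flatMap]
  apply List.flatMap_congr
  intro c hc
  exact pvPerChar c (by simpa using (List.all_eq_true.mp hdom c hc))

-- ===== VERDICT (by name: the statement is the Claim_ definition above) =====
theorem ics_escape_py_spec : Claim_equal_ics_escape_py := by
  intro text hdom
  unfold Spec_ics_escape_py ics_escape_py ics_escape_py_alt
  by_cases he : text = ""
  · simp [he]
  · simp only [if_neg he]
    rw [PySem.List.slice_to _ (by norm_num : (0:Int) ≤ 600)]
    rw [PySem.List.foldl_append_eq_flatMap, List.nil_append]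
    rw [pvChainEq text.toList hdom]
    rfl
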